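-- pv_equiv track=rewrite | github.com/cad0p/maskrcnn-modanet | maskrcnn_modanet/fix_annotations.py | maskBbox
-- ===== SOURCE A (Python) =====
-- def maskBbox(shapes):
-- 	shape_bbox = [400, 600, 0, 0]
-- 	for shape in shapes:
-- 		shape_bbox_i = shapeBbox(shape)
-- 		if shape_bbox_i[0] < shape_bbox[0]:
-- 			shape_bbox[0] = shape_bbox_i[0]
-- 		if shape_bbox_i[1] < shape_bbox[1]:
-- 			shape_bbox[1] = shape_bbox_i[1]
-- 		if shape_bbox_i[2] > shape_bbox[2]:
-- 			shape_bbox[2] = shape_bbox_i[2]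
-- 		if shape_bbox_i[3] > shape_bbox[3]:
-- 			shape_bbox[3] = shape_bbox_i[3]
-- 	return shape_bbox
--
-- def shapeBbox(shape):
-- 	shape_bbox = [400, 600, 0, 0]
-- 	for xy_index, xy in enumerate(shape):
-- 		if xy < shape_bbox[xy_index % 2]:
-- 			shape_bbox[xy_index % 2] = xy
-- 		elif xy - shape_bbox[xy_index % 2] > shape_bbox[xy_index % 2 + 2]:
-- 			shape_bbox[xy_index % 2 + 2] = xy - shape_bbox[xy_index % 2]
-- 	return shape_bbox
-- ===== SOURCE B (Python) =====
-- def _colScan(vals, sentinel):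
-- 	# running-minimum "drawdown" scan over one coordinate column
-- 	mn, w = sentinel, 0
-- 	for v in vals:
-- 		mn = min(mn, v)
-- 		w = max(w, v - mn)
-- 	return mn, w
--
-- def maskBbox(shapes):
-- 	xcols = [_colScan(s[0::2], 400) for s in shapes]
-- 	ycols = [_colScan(s[1::2], 600) for s in shapes]
-- 	return [min((m for m, _ in xcols), default=400),
-- 	        min((m for m, _ in ycols), default=600),
-- 	        max((w for _, w in xcols), default=0),
-- 	        max((w for _, w in ycols), default=0)]
-- ===== Notes on version B (the rewrite author's own statement) =====
-- stated objective: alternative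
-- what changed: B drops A's interleaved index-parity loop with chained if/elif comparison updates entirely: it splits each shape into its x and y coordinate columns via step slices, runs a running-minimum/drawdown scan per column, and aggregates the per-shape column results with builtin min/max using sentinel defaults.
import Mathlib
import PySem

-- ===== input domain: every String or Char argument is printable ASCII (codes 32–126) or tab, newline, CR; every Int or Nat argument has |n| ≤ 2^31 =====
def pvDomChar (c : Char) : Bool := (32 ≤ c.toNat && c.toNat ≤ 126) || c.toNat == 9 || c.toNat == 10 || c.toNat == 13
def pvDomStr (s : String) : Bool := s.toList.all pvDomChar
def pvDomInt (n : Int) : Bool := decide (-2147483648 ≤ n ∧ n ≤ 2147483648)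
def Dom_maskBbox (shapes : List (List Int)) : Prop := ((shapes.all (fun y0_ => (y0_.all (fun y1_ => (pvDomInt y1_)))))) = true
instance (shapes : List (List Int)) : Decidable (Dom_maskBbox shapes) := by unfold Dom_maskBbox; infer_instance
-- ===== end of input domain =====

-- B replaces A's interleaved index-parity loop with chained comparison updates by: split each
-- shape into its x/y coordinate columns (step slices), run a running-minimum/drawdown scan per
-- column, and aggregate per-shape results with builtin min/max with a default. Same return values.

-- ===== PORT A =====
-- helper: literal port of Python's shapeBbox; the 4-slot list is the tuple (s0, s1, s2, s3)
def shapeBboxP (shape : List Int) : Int × Int × Int × Int :=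
  (PySem.List.enumerate shape 0).foldl (fun s p =>
    if PySem.Int.mod p.1 2 == 0 then      -- xy_index % 2 == 0: slots 0 and 2
      if p.2 < s.1 then (p.2, s.2.1, s.2.2.1, s.2.2.2)
      else if p.2 - s.1 > s.2.2.1 then (s.1, s.2.1, p.2 - s.1, s.2.2.2)
      else s
    else                                   -- slots 1 and 3
      if p.2 < s.2.1 then (s.1, p.2, s.2.2.1, s.2.2.2)
      else if p.2 - s.2.1 > s.2.2.2 then (s.1, s.2.1, s.2.2.1, p.2 - s.2.1)
      else s) (400, 600, 0, 0)

-- A's loop body over shapes: the four chained comparison-updates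
def maskStepA (s b : Int × Int × Int × Int) : Int × Int × Int × Int :=
  ((if b.1 < s.1 then b.1 else s.1),
   (if b.2.1 < s.2.1 then b.2.1 else s.2.1),
   (if b.2.2.1 > s.2.2.1 then b.2.2.1 else s.2.2.1),
   (if b.2.2.2 > s.2.2.2 then b.2.2.2 else s.2.2.2))

def maskBbox (shapes : List (List Int)) : List Int :=
  let r := shapes.foldl (fun s shape => maskStepA s (shapeBboxP shape)) (400, 600, 0, 0)
  [r.1, r.2.1, r.2.2.1, r.2.2.2]

-- ===== PORT B =====
-- hand port of the step slice s[0::2] (start 0, step 2 over the whole list): every other element;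
-- exact for this start/step, and s[1::2] is everyOther s.tail.
def everyOther : List Int → List Int
  | [] => []
  | [a] => [a]
  | a :: _ :: t => a :: everyOther t

-- _colScan: running-minimum / drawdown scan over one coordinate column
def colScan (vals : List Int) (sentinel : Int) : Int × Int :=
  vals.foldl (fun p v => let mn := min p.1 v; (mn, max p.2 (v - mn))) (sentinel, 0)

def maskBbox_alt (shapes : List (List Int)) : List Int :=
  let xcols := shapes.map (fun s => colScan (everyOther s) 400)
  let ycols := shapes.map (fun s => colScan (everyOther s.tail) 600)
  [ (PySem.List.min? (xcols.map (fun p => p.1)) (fun x => x)).getD 400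
  , (PySem.List.min? (ycols.map (fun p => p.1)) (fun x => x)).getD 600
  , (PySem.List.max? (xcols.map (fun p => p.2)) (fun x => x)).getD 0
  , (PySem.List.max? (ycols.map (fun p => p.2)) (fun x => x)).getD 0 ]

-- ===== PRECONDITION & SPEC =====
def Spec_maskBbox (shapes : List (List Int)) (out : List Int) : Prop := out = maskBbox_alt shapes
instance (shapes : List (List Int)) (out : List Int) : Decidable (Spec_maskBbox shapes out) := by unfold Spec_maskBbox; infer_instance

-- ===== CLAIM (what is proved, stated in full; the proofs are below) =====
def Claim_equal_maskBbox : Prop := ∀ (shapes : List (List Int)), Dom_maskBbox shapes → Spec_maskBbox shapes (maskBbox shapes)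

-- ===== LEMMAS AND PROOFS =====

-- proof-helper: the column scan with both state components free
def scan2 (L : List Int) (a c : Int) : Int × Int :=
  L.foldl (fun p v => let mn := min p.1 v; (mn, max p.2 (v - mn))) (a, c)

theorem colScan_eq_scan2 (L : List Int) (s : Int) : colScan L s = scan2 L s 0 := rfl

theorem scan2_cons (v : Int) (t : List Int) (a c : Int) :
    scan2 (v :: t) a c = scan2 t (min a v) (max c (v - min a v)) := rfl

theorem everyOther_cons (v : Int) (t : List Int) :
    everyOther (v :: t) = v :: everyOther t.tail := by
  match t with
  | [] => rfl
  | x :: t' => rfl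

theorem scan2_fst_le (L : List Int) (a c : Int) : (scan2 L a c).1 ≤ a := by
  induction L generalizing a c with
  | nil => simp [scan2]
  | cons v t ih =>
      rw [scan2_cons]
      exact le_trans (ih _ _) (min_le_left _ _)

theorem scan2_snd_ge (L : List Int) (a c : Int) : c ≤ (scan2 L a c).2 := by
  induction L generalizing a c with
  | nil => simp [scan2]
  | cons v t ih =>
      rw [scan2_cons]
      exact le_trans (le_max_left _ _) (ih _ _)

-- A's interleaved enumerate-fold equals the two column scans, state split by the parity of n
theorem interleave (shape : List Int) (n : Int) (hn : 0 ≤ n) (a b c d : Int)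
    (hc : 0 ≤ c) (hd : 0 ≤ d) :
    (PySem.List.enumerate shape n).foldl (fun s p =>
      if PySem.Int.mod p.1 2 == 0 then
        if p.2 < s.1 then (p.2, s.2.1, s.2.2.1, s.2.2.2)
        else if p.2 - s.1 > s.2.2.1 then (s.1, s.2.1, p.2 - s.1, s.2.2.2)
        else s
      else
        if p.2 < s.2.1 then (s.1, p.2, s.2.2.1, s.2.2.2)
        else if p.2 - s.2.1 > s.2.2.2 then (s.1, s.2.1, s.2.2.1, p.2 - s.2.1)
        else s) (a, b, c, d)
    = if n % 2 = 0 then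
        ((scan2 (everyOther shape) a c).1, (scan2 (everyOther shape.tail) b d).1,
         (scan2 (everyOther shape) a c).2, (scan2 (everyOther shape.tail) b d).2)
      else
        ((scan2 (everyOther shape.tail) a c).1, (scan2 (everyOther shape) b d).1,
         (scan2 (everyOther shape.tail) a c).2, (scan2 (everyOther shape) b d).2) := by
  induction shape generalizing n a b c d with
  | nil => simp [PySem.List.enumerate, scan2, everyOther]
  | cons v t ih =>
      rw [PySem.List.enumerate_cons, List.foldl_cons]
      have hmod : PySem.Int.mod n 2 = n % 2 := PySem.Int.mod_eq_emod_of_pos (by omega)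
      by_cases hpar : n % 2 = 0
      · -- even index: x-branch fires
        have hb : (PySem.Int.mod n 2 == 0) = true := by rw [hmod]; simp [hpar]
        have step :
            (if v < a then ((v:Int), b, c, d)
             else if v - a > c then (a, b, v - a, d) else (a, b, c, d))
            = (min a v, b, max c (v - min a v), d) := by
          rcases lt_or_ge v a with h | h
          · have h1 : min a v = v := by omega
            have h2 : max c (0:Int) = c := by omega
            simp [h, h1, h2]
          · have h1 : min a v = a := by omega
            have hnv : ¬ v < a := by omega
            by_cases h2 : v - a > c
            · have : max c (v - a) = v - a := by omega
              simp [hnv, h2, h1, this]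
            · have : max c (v - a) = c := by omega
              simp [hnv, h2, h1, this]
        simp only [hb, if_true]
        rw [step]
        rw [ih (n+1) (by omega) _ _ _ _ (le_trans hc (le_max_left _ _)) hd]
        have hpar' : ¬ (n + 1) % 2 = 0 := by omega
        rw [if_neg hpar', if_pos hpar, everyOther_cons, scan2_cons]; simp
      · -- odd index: y-branch fires
        have hb : (PySem.Int.mod n 2 == 0) = false := by rw [hmod]; simp [hpar]
        have step :
            (if v < b then ((a:Int), v, c, d)
             else if v - b > d then (a, b, c, v - b) else (a, b, c, d))
            = (a, min b v, c, max d (v - min b v)) := by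
          rcases lt_or_ge v b with h | h
          · have h1 : min b v = v := by omega
            have h2 : max d (0:Int) = d := by omega
            simp [h, h1, h2]
          · have h1 : min b v = b := by omega
            have hnv : ¬ v < b := by omega
            by_cases h2 : v - b > d
            · have : max d (v - b) = v - b := by omega
              simp [hnv, h2, h1, this]
            · have : max d (v - b) = d := by omega
              simp [hnv, h2, h1, this]
        simp only [hb, Bool.false_eq_true, if_false]
        rw [step]
        rw [ih (n+1) (by omega) _ _ _ _ hc (le_trans hd (le_max_left _ _))]
        have hpar' : (n + 1) % 2 = 0 := by omega
        rw [if_pos hpar', if_neg hpar, everyOther_cons, scan2_cons]; simp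

-- shapeBbox splits into the two column scans
theorem shapeBboxP_eq (shape : List Int) :
    shapeBboxP shape
      = ((scan2 (everyOther shape) 400 0).1, (scan2 (everyOther shape.tail) 600 0).1,
         (scan2 (everyOther shape) 400 0).2, (scan2 (everyOther shape.tail) 600 0).2) := by
  have h := interleave shape 0 (by omega) 400 600 0 0 (by omega) (by omega)
  simpa [shapeBboxP] using h

-- A's combined fold over per-shape boxes splits into four column folds
theorem maskBbox_fold_split (L : List (Int × Int × Int × Int)) (s : Int × Int × Int × Int) :
    L.foldl maskStepA s
    = ((L.map (fun b => b.1)).foldl min s.1,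
       (L.map (fun b => b.2.1)).foldl min s.2.1,
       (L.map (fun b => b.2.2.1)).foldl max s.2.2.1,
       (L.map (fun b => b.2.2.2)).foldl max s.2.2.2) := by
  induction L generalizing s with
  | nil => rfl
  | cons b L ih =>
      simp only [List.foldl_cons, List.map_cons, ih, maskStepA]
      have h1 : (if b.1 < s.1 then b.1 else s.1) = min s.1 b.1 := by
        simp [min_def]; omega
      have h2 : (if b.2.1 < s.2.1 then b.2.1 else s.2.1) = min s.2.1 b.2.1 := by
        simp [min_def]; omega
      have h3 : (if b.2.2.1 > s.2.2.1 then b.2.2.1 else s.2.2.1) = max s.2.2.1 b.2.2.1 := by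
        simp [max_def]; omega
      have h4 : (if b.2.2.2 > s.2.2.2 then b.2.2.2 else s.2.2.2) = max s.2.2.2 b.2.2.2 := by
        simp [max_def]; omega
      rw [h1, h2, h3, h4]

-- min(xs, default=c) equals the seeded running min when every element is ≤ c
theorem minD_eq_foldl (L : List Int) (c : Int) (h : ∀ x ∈ L, x ≤ c) :
    (PySem.List.min? L (fun x => x)).getD c = L.foldl min c := by
  cases L with
  | nil => simp [PySem.List.min?]
  | cons x t =>
      rw [PySem.List.min?_id_cons]
      have hx : min c x = x := by
        have := h x (by simp); omega
      simp [List.foldl_cons, hx]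

theorem maxD_eq_foldl (L : List Int) (c : Int) (h : ∀ x ∈ L, c ≤ x) :
    (PySem.List.max? L (fun x => x)).getD c = L.foldl max c := by
  cases L with
  | nil => simp [PySem.List.max?]
  | cons x t =>
      rw [PySem.List.max?_id_cons]
      have hx : max c x = x := by
        have := h x (by simp); omega
      simp [List.foldl_cons, hx]

-- ===== VERDICT (by name: the statement is the Claim_ definition above) =====
theorem maskBbox_spec : Claim_equal_maskBbox := by
  intro shapes _
  show maskBbox shapes = maskBbox_alt shapes
  simp only [maskBbox, maskBbox_alt]
  rw [← List.foldl_map (f := shapeBboxP) (g := maskStepA),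
      maskBbox_fold_split (shapes.map shapeBboxP) (400, 600, 0, 0)]
  have e1 : (shapes.map shapeBboxP).map (fun b => b.1)
      = (shapes.map (fun s => colScan (everyOther s) 400)).map (fun p => p.1) := by
    simp [List.map_map, Function.comp, shapeBboxP_eq, colScan_eq_scan2]
  have e2 : (shapes.map shapeBboxP).map (fun b => b.2.1)
      = (shapes.map (fun s => colScan (everyOther s.tail) 600)).map (fun p => p.1) := by
    simp [List.map_map, Function.comp, shapeBboxP_eq, colScan_eq_scan2]
  have e3 : (shapes.map shapeBboxP).map (fun b => b.2.2.1)
      = (shapes.map (fun s => colScan (everyOther s) 400)).map (fun p => p.2) := by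
    simp [List.map_map, Function.comp, shapeBboxP_eq, colScan_eq_scan2]
  have e4 : (shapes.map shapeBboxP).map (fun b => b.2.2.2)
      = (shapes.map (fun s => colScan (everyOther s.tail) 600)).map (fun p => p.2) := by
    simp [List.map_map, Function.comp, shapeBboxP_eq, colScan_eq_scan2]
  rw [e1, e2, e3, e4,
    minD_eq_foldl _ 400 (by
      intro x hx
      simp only [List.mem_map] at hx
      obtain ⟨p, ⟨s, _, rfl⟩, rfl⟩ := hx
      simpa [colScan_eq_scan2] using scan2_fst_le (everyOther s) 400 0),
    minD_eq_foldl _ 600 (by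
      intro x hx
      simp only [List.mem_map] at hx
      obtain ⟨p, ⟨s, _, rfl⟩, rfl⟩ := hx
      simpa [colScan_eq_scan2] using scan2_fst_le (everyOther s.tail) 600 0),
    maxD_eq_foldl _ 0 (by
      intro x hx
      simp only [List.mem_map] at hx
      obtain ⟨p, ⟨s, _, rfl⟩, rfl⟩ := hx
      simpa [colScan_eq_scan2] using scan2_snd_ge (everyOther s) 400 0),
    maxD_eq_foldl _ 0 (by
      intro x hx
      simp only [List.mem_map] at hx
      obtain ⟨p, ⟨s, _, rfl⟩, rfl⟩ := hx
      simpa [colScan_eq_scan2] using scan2_snd_ge (everyOther s.tail) 600 0)]
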